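-- pv_equiv track=rewrite | github.com/Averyy/jlcpcb-mcp | scripts/scrapers/bestmodules.py | _build_description
-- ===== SOURCE A (Python) =====
-- def _build_description(title: str, features: list[str]) -> str | None:
--     """Build a concise description from title and key features."""
--     parts = [title]
--     for feat in features:
--         fl = feat.lower()
--         # Add key spec features to description
--         if any(k in fl for k in [
--             "detection range", "resolution", "accuracy", "measuring range",
--             "pressure range", "detect", "measure",
--         ]):
--             parts.append(feat)
--             if len(". ".join(parts)) > 180:
--                 break
--
--     desc = ". ".join(parts)
--     if len(desc) > 200:
--         desc = desc[:197] + "..."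
--     return desc if desc else None
-- ===== SOURCE B (Python) =====
-- def _build_description(title: str, features: list[str]) -> str | None:
--     """Build a concise description from title and key features."""
--     KEYWORDS = ("detection range", "resolution", "accuracy", "measuring range",
--                 "pressure range", "detect", "measure")
--     # Phase 1: the feature lines that mention a key spec keyword.
--     matched = [f for f in features if any(k in f.lower() for k in KEYWORDS)]
--     # Phase 2: prefix sums — cum[i] = length of ". ".join([title] + matched[:i]).
--     cum = [len(title)]
--     last = len(title)
--     for f in matched:
--         last = last + 2 + len(f)
--         cum.append(last)
--     # Phase 3: how many matched features to keep — up to and including the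
--     # first one that pushes the joined length past 180 (all of them otherwise).
--     keep = next((i for i, total in enumerate(cum[1:], 1) if total > 180),
--                 len(matched))
--     # Phase 4: build the result once.
--     desc = ". ".join([title] + matched[:keep])
--     if len(desc) > 200:
--         desc = desc[:197] + "..."
--     return desc or None
-- ===== Notes on version B (the rewrite author's own statement) =====
-- stated objective: alternative
-- what changed: B replaces A's incremental append-and-rejoin loop by staged passes: filter the matching features, compute prefix sums of the joined length, locate the cutoff index with next() over the enumerated sums, and build the result with a single slice-and-join.
import Mathlib
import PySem

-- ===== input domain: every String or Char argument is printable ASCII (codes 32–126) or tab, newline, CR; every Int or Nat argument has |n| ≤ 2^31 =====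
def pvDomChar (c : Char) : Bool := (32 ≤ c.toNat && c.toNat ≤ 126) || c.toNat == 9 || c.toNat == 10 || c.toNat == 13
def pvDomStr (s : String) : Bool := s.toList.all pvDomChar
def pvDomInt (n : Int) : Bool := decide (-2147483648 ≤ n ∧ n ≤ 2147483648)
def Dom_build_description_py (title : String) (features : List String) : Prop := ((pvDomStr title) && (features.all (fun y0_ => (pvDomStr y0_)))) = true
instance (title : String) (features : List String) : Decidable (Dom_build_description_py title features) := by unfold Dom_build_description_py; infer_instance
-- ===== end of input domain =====

-- ===== PORT A =====
-- B replaces A's incremental append-and-rejoin loop by prefix sums and a computed cutoff index, building the result once; A = B on all inputs.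
-- shared constant: the keyword list (as lists of chars)
def pvKws : List (List Char) :=
  ["detection range".toList, "resolution".toList, "accuracy".toList, "measuring range".toList,
   "pressure range".toList, "detect".toList, "measure".toList]

def pvSep : List Char := ". ".toList

-- A's loop: keyword test, append to the parts list, re-join to check the length
def pvALoop (parts : List (List Char)) : List String → List (List Char)
  | [] => parts
  | f :: rest =>
    let fl := PySem.Chars.lower f.toList
    if pvKws.any (fun k => PySem.Chars.isIn k fl) then
      let parts' := parts ++ [f.toList]
      if 180 < (PySem.Chars.join pvSep parts').length then parts'
      else pvALoop parts' rest
    else pvALoop parts rest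

def build_description_py (title : String) (features : List String) : Option String :=
  let parts := pvALoop [title.toList] features
  let desc := PySem.Chars.join pvSep parts
  let desc := if 200 < desc.length then PySem.Chars.slice desc none (some 197) ++ "...".toList else desc
  if desc = [] then none else some (String.ofList desc)

-- ===== PORT B =====
-- B's prefix-sum loop: cum[i] = length of ". ".join([title] + matched[:i])
def pvCumLoop (cum : List Nat) (last : Nat) : List String → List Nat
  | [] => cum
  | f :: rest => pvCumLoop (cum ++ [last + 2 + f.toList.length]) (last + 2 + f.toList.length) rest

def build_description_py_alt (title : String) (features : List String) : Option String :=
  let matched := features.filter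
    (fun f => pvKws.any (fun k => PySem.Chars.isIn k (PySem.Chars.lower f.toList)))
  let cum := pvCumLoop [title.toList.length] title.toList.length matched
  -- next((i for i, total in enumerate(cum[1:], 1) if total > 180), len(matched))
  let keep : Int :=
    match (PySem.List.enumerate (PySem.List.slice cum (some 1) none) 1).find?
        (fun x => 180 < x.2) with
    | some (i, _) => i
    | none => (matched.length : Int)
  let desc := PySem.Chars.join pvSep
    ([title.toList] ++ (PySem.List.slice matched none (some keep)).map String.toList)
  let desc := if 200 < desc.length then PySem.Chars.slice desc none (some 197) ++ "...".toList else desc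
  if desc = [] then none else some (String.ofList desc)

-- ===== PRECONDITION & SPEC =====
def Spec_build_description_py (title : String) (features : List String) (out : Option String) : Prop := out = build_description_py_alt title features
instance (title : String) (features : List String) (out : Option String) : Decidable (Spec_build_description_py title features out) := by unfold Spec_build_description_py; infer_instance

-- ===== CLAIM (what is proved, stated in full; the proofs are below) =====
def Claim_equal_build_description_py : Prop := ∀ (title : String) (features : List String), Dom_build_description_py title features → Spec_build_description_py title features (build_description_py title features)

-- ===== LEMMAS AND PROOFS =====

-- the keyword test both programs use
def pvP (f : String) : Bool := pvKws.any (fun k => PySem.Chars.isIn k (PySem.Chars.lower f.toList))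

-- how many features, starting at accumulated length t, A keeps (including the one crossing 180)
def pvKCount : Nat → List String → Nat
  | _, [] => 0
  | t, f :: r =>
    if 180 < t + 2 + f.toList.length then 1 else 1 + pvKCount (t + 2 + f.toList.length) r

-- the tail of B's prefix-sum list
def pvCumTail : Nat → List String → List Nat
  | _, [] => []
  | t, f :: r => (t + 2 + f.toList.length) :: pvCumTail (t + 2 + f.toList.length) r

-- a ". "-join of a snoc: joining parts ++ [f] appends ". " ++ f (parts nonempty)
theorem pv_join_snoc (parts : List (List Char)) (f : List Char) (h : parts ≠ []) :
    PySem.Chars.join pvSep (parts ++ [f])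
      = PySem.Chars.join pvSep parts ++ pvSep ++ f := by
  induction parts with
  | nil => simp at h
  | cons p ps ih =>
    cases ps with
    | nil => simp [PySem.Chars.join_cons_cons, PySem.Chars.join_singleton]
    | cons q qs =>
      have := ih (by simp)
      simp only [List.cons_append, PySem.Chars.join_cons_cons] at *
      simp_all

-- A's loop keeps exactly the first pvKCount matching features
theorem pv_aloop_char (feats : List String) (parts : List (List Char)) (h : parts ≠ []) :
    pvALoop parts feats
      = parts ++ ((feats.filter pvP).take
          (pvKCount (PySem.Chars.join pvSep parts).length (feats.filter pvP))).map String.toList := by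
  induction feats generalizing parts with
  | nil => simp [pvALoop, pvKCount]
  | cons f rest ih =>
    simp only [pvALoop, List.filter_cons]
    by_cases hc : pvP f = true
    · rw [if_pos (by simpa [pvP] using hc), if_pos hc]
      have hj := pv_join_snoc parts f.toList h
      have hlen : (PySem.Chars.join pvSep (parts ++ [f.toList])).length
          = (PySem.Chars.join pvSep parts).length + 2 + f.toList.length := by
        rw [hj]; simp [pvSep]; omega
      simp only [pvKCount]
      by_cases hbr : 180 < (PySem.Chars.join pvSep parts).length + 2 + f.toList.length
      · rw [if_pos (by omega : 180 < (PySem.Chars.join pvSep (parts ++ [f.toList])).length),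
            if_pos hbr]
        simp
      · rw [if_neg (by omega : ¬ 180 < (PySem.Chars.join pvSep (parts ++ [f.toList])).length),
            if_neg hbr, ih _ (by simp), hlen]
        simp [List.take_cons]
    · rw [if_neg (by simpa [pvP] using hc), if_neg hc, ih _ h]

-- B's prefix-sum loop appends pvCumTail
theorem pv_cumloop_char (ms : List String) (cum : List Nat) (t : Nat) :
    pvCumLoop cum t ms = cum ++ pvCumTail t ms := by
  induction ms generalizing cum t with
  | nil => simp [pvCumLoop, pvCumTail]
  | cons f r ih => simp [pvCumLoop, pvCumTail, ih]

-- B's cutoff search over the enumerated prefix sums computes pvKCount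
theorem pv_keep_char (ms : List String) (t j : Nat) :
    (match (PySem.List.enumerate (pvCumTail t ms) ((j : Int) + 1)).find?
        (fun x => 180 < x.2) with
     | some (i, _) => i
     | none => ((j + ms.length : Nat) : Int)) = ((j + pvKCount t ms : Nat) : Int) := by
  induction ms generalizing t j with
  | nil => simp [pvCumTail, pvKCount]
  | cons f r ih =>
    simp only [pvCumTail, pvKCount, PySem.List.enumerate_cons]
    by_cases hbr : 180 < t + 2 + f.toList.length
    · rw [List.find?_cons_of_pos (by simpa using hbr), if_pos hbr]
      push_cast; ring
    · rw [List.find?_cons_of_neg (by simpa using hbr), if_neg hbr]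
      have h2 : (j : Int) + 1 + 1 = ((j + 1 : Nat) : Int) + 1 := by push_cast; ring
      rw [h2]
      have := ih (t + 2 + f.toList.length) (j + 1)
      rw [show ((j + 1) + r.length : Nat) = (j + (f :: r).length : Nat) by simp; omega] at this
      rw [this]
      congr 1
      omega

-- ===== VERDICT (by name: the statement is the Claim_ definition above) =====
theorem build_description_py_spec : Claim_equal_build_description_py := by
  intro title features _
  unfold Spec_build_description_py build_description_py build_description_py_alt
  have hfilter : (features.filter
      (fun f => pvKws.any (fun k => PySem.Chars.isIn k (PySem.Chars.lower f.toList))))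
      = features.filter pvP := rfl
  simp only [hfilter]
  rw [pv_aloop_char features [title.toList] (by simp), pv_cumloop_char]
  simp only [PySem.Chars.join_singleton, List.singleton_append,
    PySem.List.slice_from_one, List.tail_cons]
  have hkeep := pv_keep_char (features.filter pvP) title.toList.length 0
  simp only [Nat.cast_zero, zero_add] at hkeep
  simp only [hkeep, PySem.List.slice_to_natCast]
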